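-- pv_equiv track=rewrite | github.com/sauravdwivedi/Python | AnnoyedCoworkers.py | annoyance_level
-- ===== SOURCE A (Python) =====
-- def annoyance_level(coworkers, num_of_tasks, num_of_coworkers):
--     """Method to find out maximum annoyance level"""
--     annoyance = []
--     annoyance_levels = []
--     for worker in coworkers:
--         annoyance.append(worker[0]+worker[1])
--         annoyance_levels.append(worker[0])
--     for i in range(num_of_tasks):
--         min_index = annoyance.index(min(annoyance))
--         increase_annoy = coworkers[min_index][1]
--         annoyance_levels[min_index] += increase_annoy
--         annoyance[min_index] += increase_annoy
--     return max(annoyance_levels)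
-- ===== SOURCE B (Python) =====
-- def _insert_sorted(lst, x):
--     for k in range(len(lst)):
--         if x < lst[k]:
--             lst.insert(k, x)
--             return
--     lst.append(x)
--
-- def annoyance_level(coworkers, num_of_tasks, num_of_coworkers):
--     """Maintain a sorted queue of (annoyance, index); the head is the greedy pick,
--     and each worker's current level is always his annoyance minus his increment."""
--     order = []
--     for i, (level, inc) in enumerate(coworkers):
--         _insert_sorted(order, (level + inc, i))
--     for _ in range(num_of_tasks):
--         v, i = order[0]
--         del order[0]
--         _insert_sorted(order, (v + coworkers[i][1], i))
--     return max(v - coworkers[i][1] for v, i in order)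
-- ===== Notes on version B (the rewrite author's own statement) =====
-- stated objective: alternative
-- what changed: Replaces the two parallel arrays and the per-task min()+index() double scan by a single sorted queue of (annoyance, index) pairs whose head is the greedy pick, re-inserted in order after each task; the levels array disappears entirely and the answer is derived as max(annoyance - increment) over the final queue.
-- outside the precondition, e.g. on annoyance_level([], 3, 0): A raises ValueError, B raises IndexError
import Mathlib
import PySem

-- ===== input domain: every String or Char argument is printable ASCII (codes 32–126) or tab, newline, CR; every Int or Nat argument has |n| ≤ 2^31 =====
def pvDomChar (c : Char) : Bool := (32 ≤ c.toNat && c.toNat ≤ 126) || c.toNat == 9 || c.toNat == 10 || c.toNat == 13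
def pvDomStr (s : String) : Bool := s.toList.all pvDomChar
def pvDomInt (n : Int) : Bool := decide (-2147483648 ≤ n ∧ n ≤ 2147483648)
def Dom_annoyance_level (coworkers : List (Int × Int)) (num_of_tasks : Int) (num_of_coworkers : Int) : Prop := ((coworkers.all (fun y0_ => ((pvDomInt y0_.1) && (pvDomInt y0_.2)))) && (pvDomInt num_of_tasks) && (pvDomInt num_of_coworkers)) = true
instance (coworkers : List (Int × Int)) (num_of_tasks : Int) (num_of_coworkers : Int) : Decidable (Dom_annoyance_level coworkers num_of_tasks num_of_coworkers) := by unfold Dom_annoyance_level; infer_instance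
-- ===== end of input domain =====

-- ===== PORT A =====
-- B replaces A's two parallel arrays and per-task min()+index() double scan by one
-- sorted queue of (annoyance, index) pairs; similar cost, different structure (objective: alternative).
def pvAStep (coworkers : List (Int × Int)) (s : List Int × List Int) : List Int × List Int :=
  let m := (PySem.List.min? s.1 (fun x => x)).getD 0
  let j := (PySem.List.index? s.1 m).getD 0
  let inc := ((PySem.List.pyGet? coworkers (j : Int)).getD (0, 0)).2
  (s.1.set j (s.1.getD j 0 + inc), s.2.set j (s.2.getD j 0 + inc))

def annoyance_level (coworkers : List (Int × Int)) (num_of_tasks : Int) (num_of_coworkers : Int) : Int :=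
  let annoyance := coworkers.map (fun w => w.1 + w.2)
  let annoyance_levels := coworkers.map (fun w => w.1)
  let s := (PySem.List.pyRange 0 num_of_tasks 1).foldl (fun s _ => pvAStep coworkers s)
    (annoyance, annoyance_levels)
  (PySem.List.max? s.2 (fun x => x)).getD 0

-- ===== PORT B =====
-- Python tuple comparison (v, i) < (w, j): lexicographic on Int pairs
def pvTupLt (x y : Int × Int) : Bool := decide (x.1 < y.1) || (x.1 == y.1 && decide (x.2 < y.2))

-- _insert_sorted: linear scan, insert before the first strictly larger element
def pvInsort (x : Int × Int) : List (Int × Int) → List (Int × Int)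
  | [] => [x]
  | y :: t => if pvTupLt x y then x :: y :: t else y :: pvInsort x t

def pvDOf (coworkers : List (Int × Int)) (i : Int) : Int :=
  ((PySem.List.pyGet? coworkers i).getD (0, 0)).2

-- one task: pop the head of the sorted queue, re-insert it with its annoyance increased
def pvAltStep (coworkers : List (Int × Int)) (L : List (Int × Int)) : List (Int × Int) :=
  match L with
  | [] => []
  | (v, i) :: rest => pvInsort (v + pvDOf coworkers i, i) rest

def annoyance_level_alt (coworkers : List (Int × Int)) (num_of_tasks : Int) (num_of_coworkers : Int) : Int :=
  let order0 := (PySem.List.enumerate coworkers).foldl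
    (fun L p => pvInsort (p.2.1 + p.2.2, p.1) L) []
  let order := (PySem.List.pyRange 0 num_of_tasks 1).foldl (fun L _ => pvAltStep coworkers L) order0
  (PySem.List.max? (order.map (fun p => p.1 - pvDOf coworkers p.2)) (fun x => x)).getD 0

-- ===== PRECONDITION & SPEC =====
-- Pre_ excludes only the empty coworker list, on which A raises ValueError (min of an empty sequence).
def Pre_annoyance_level (coworkers : List (Int × Int)) (num_of_tasks : Int) (num_of_coworkers : Int) : Prop :=
  coworkers ≠ []
instance (coworkers : List (Int × Int)) (num_of_tasks : Int) (num_of_coworkers : Int) : Decidable (Pre_annoyance_level coworkers num_of_tasks num_of_coworkers) := by unfold Pre_annoyance_level; infer_instance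
def pvWitness_annoyance_level : (List (Int × Int)) × Int × Int := ([(1, 2), (3, 0)], 3, 2)

def Spec_annoyance_level (coworkers : List (Int × Int)) (num_of_tasks : Int) (num_of_coworkers : Int) (out : Int) : Prop := out = annoyance_level_alt coworkers num_of_tasks num_of_coworkers
instance (coworkers : List (Int × Int)) (num_of_tasks : Int) (num_of_coworkers : Int) (out : Int) : Decidable (Spec_annoyance_level coworkers num_of_tasks num_of_coworkers out) := by unfold Spec_annoyance_level; infer_instance

-- ===== CLAIM (what is proved, stated in full; the proofs are below) =====
def Claim_equal_annoyance_level : Prop := ∀ (coworkers : List (Int × Int)) (num_of_tasks : Int) (num_of_coworkers : Int), Dom_annoyance_level coworkers num_of_tasks num_of_coworkers → Pre_annoyance_level coworkers num_of_tasks num_of_coworkers → Spec_annoyance_level coworkers num_of_tasks num_of_coworkers (annoyance_level coworkers num_of_tasks num_of_coworkers)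

-- ===== LEMMAS AND PROOFS =====

def pvPairs (s : Int) : List Int → List (Int × Int)
  | [] => []
  | a :: t => (a, s) :: pvPairs (s + 1) t

theorem mem_pvPairs {v i : Int} (l : List Int) (s : Int) :
    (v, i) ∈ pvPairs s l ↔ ∃ (k : Nat), ∃ (hk : k < l.length), i = s + k ∧ l[k] = v := by
  induction l generalizing s with
  | nil => simp [pvPairs]
  | cons a t ih =>
    simp only [pvPairs, List.mem_cons, ih, Prod.mk.injEq]
    constructor
    · rintro (⟨rfl, rfl⟩ | ⟨k, hk, rfl, rfl⟩)
      · exact ⟨0, by simp, by simp⟩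
      · exact ⟨k + 1, by simp [hk], by constructor <;> simp <;> omega⟩
    · rintro ⟨k, hk, rfl, rfl⟩
      cases k with
      | zero => left; simp
      | succ k => right; exact ⟨k, by simpa using hk, by push_cast; constructor; omega; simp⟩

theorem pvInsort_perm (x : Int × Int) (l : List (Int × Int)) : (pvInsort x l).Perm (x :: l) := by
  induction l with
  | nil => rfl
  | cons y t ih =>
    simp only [pvInsort]
    split
    · rfl
    · exact (List.Perm.cons y ih).trans (List.Perm.swap x y t)

theorem pvTupLt_total {x y : Int × Int} (h : pvTupLt x y = false) (hne : x ≠ y) : pvTupLt y x = true := by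
  rcases x with ⟨a, b⟩; rcases y with ⟨c, d⟩
  simp only [pvTupLt, Bool.or_eq_false_iff, Bool.or_eq_true, Bool.and_eq_false_iff,
    Bool.and_eq_true, decide_eq_false_iff_not, decide_eq_true_eq, beq_iff_eq, Prod.mk.injEq,
    ne_eq, not_and, beq_eq_false_iff_ne] at *
  omega

theorem mem_pvInsort {y x : Int × Int} {l : List (Int × Int)} :
    y ∈ pvInsort x l ↔ y = x ∨ y ∈ l := by
  rw [(pvInsort_perm x l).mem_iff, List.mem_cons]

theorem pvInsort_pairwise {x : Int × Int} {l : List (Int × Int)}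
    (hl : l.Pairwise (fun a b => pvTupLt a b = true)) (hx : ∀ y ∈ l, x ≠ y) :
    (pvInsort x l).Pairwise (fun a b => pvTupLt a b = true) := by
  induction l with
  | nil => simp [pvInsort]
  | cons y t ih =>
    rcases List.pairwise_cons.mp hl with ⟨hy, ht⟩
    simp only [pvInsort]
    split
    · rename_i hlt
      refine List.pairwise_cons.mpr ⟨?_, hl⟩
      intro z hz
      rcases List.mem_cons.mp hz with rfl | hz
      · exact hlt
      · -- pvTupLt x z: x < y ≤ z... need transitivity
        have := hy z hz
        rcases x with ⟨a,b⟩; rcases y with ⟨c,d⟩; rcases z with ⟨e,f⟩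
        simp only [pvTupLt, Bool.or_eq_true, Bool.and_eq_true, decide_eq_true_eq, beq_iff_eq] at *
        omega
    · rename_i hnlt
      refine List.pairwise_cons.mpr ⟨?_, ih ht (fun z hz => hx z (List.mem_cons_of_mem y hz))⟩
      intro z hz
      rcases mem_pvInsort.mp hz with rfl | hz
      · exact pvTupLt_total (by simpa using hnlt) (hx y List.mem_cons_self)
      · exact hy z hz

def pvLev (ann : List Int) (cw : List (Int × Int)) : List Int :=
  List.zipWith (fun a w => a - w.2) ann cw

-- coupling invariant between A's state (annoyance, levels) and B's sorted queue
def pvRel (cw : List (Int × Int)) (s : List Int × List Int) (L : List (Int × Int)) : Prop :=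
  s.1.length = cw.length ∧ s.2 = pvLev s.1 cw ∧
  L.Perm (pvPairs 0 s.1) ∧ L.Pairwise (fun a b => pvTupLt a b = true)


theorem pvPairs_set (l : List Int) (k : Nat) (s x : Int) (hk : k < l.length) :
    (pvPairs s (l.set k x)).Perm ((x, s + k) :: (pvPairs s l).erase (l[k], s + k)) := by
  induction l generalizing s k with
  | nil => simp at hk
  | cons a t ih =>
    cases k with
    | zero => simp [pvPairs, List.erase_cons_head]
    | succ k =>
      have hk' : k < t.length := by simpa using hk
      have hne : (a, s) ≠ (t[k], s + (k + 1 : Nat)) := by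
        intro h; have := congrArg Prod.snd h; simp at this; omega
      simp only [List.set_cons_succ, pvPairs, List.getElem_cons_succ]
      rw [List.erase_cons_tail (by simpa using hne ∘ (beq_iff_eq.mp ·))]
      have hcast : (s : Int) + ((k : Nat) + 1 : Nat) = s + 1 + (k : Nat) := by push_cast; ring
      rw [hcast]
      refine List.Perm.trans (List.Perm.cons (a, s) (ih k (s + 1) hk')) ?_
      exact List.Perm.swap _ _ _

theorem pvLev_set (ann : List Int) (cw : List (Int × Int)) (k : Nat) (inc : Int)
    (hk : k < ann.length) (hlen : ann.length = cw.length) :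
    (pvLev ann cw).set k ((pvLev ann cw).getD k 0 + inc) = pvLev (ann.set k (ann.getD k 0 + inc)) cw := by
  induction ann generalizing cw k with
  | nil => simp at hk
  | cons a t ih =>
    cases cw with
    | nil => simp at hlen
    | cons w cs =>
      cases k with
      | zero => simp [pvLev]; ring
      | succ k =>
        simp only [pvLev, List.zipWith_cons_cons, List.set_cons_succ, List.getD_cons_succ]
        rw [show (List.zipWith (fun a w => a - w.2) t cs).set k
              ((List.zipWith (fun a w => a - w.2) t cs).getD k 0 + inc)
            = pvLev (t.set k (t.getD k 0 + inc)) cs from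
          ih cs k (by simpa using hk) (by simpa using hlen)]
        rfl

theorem pvMaxPerm (l l' : List Int) (h : l.Perm l') :
    (PySem.List.max? l (fun x => x)).getD 0 = (PySem.List.max? l' (fun x => x)).getD 0 := by
  rcases hm : PySem.List.max? l (fun x => x) with _ | m
  · rw [PySem.List.max?_eq_none_iff] at hm
    subst hm
    have h2 : l' = [] := h.symm.eq_nil
    subst h2
    rw [(PySem.List.max?_eq_none_iff [] (fun x => x)).mpr rfl]
  · rcases hm' : PySem.List.max? l' (fun x => x) with _ | m'
    · rw [PySem.List.max?_eq_none_iff] at hm'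
      subst hm'
      rw [h.eq_nil, (PySem.List.max?_eq_none_iff [] (fun x => x)).mpr rfl] at hm
      simp at hm
    · have h1 : m ≤ m' := PySem.List.max?_isMax hm' m (h.mem_iff.mp (PySem.List.max?_mem hm))
      have h2 : m' ≤ m := PySem.List.max?_isMax hm m' (h.mem_iff.mpr (PySem.List.max?_mem hm'))
      simp [le_antisymm h1 h2]
theorem pvPairsMap (ann : List Int) (cw : List (Int × Int)) (s : Nat)
    (hlen : ann.length + s ≤ cw.length) :
    (pvPairs (s : Int) ann).map (fun p => p.1 - pvDOf cw p.2) = pvLev ann (cw.drop s) := by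
  induction ann generalizing s with
  | nil => simp [pvPairs, pvLev]
  | cons a t ih =>
    have hs : s < cw.length := by simp at hlen; omega
    have hdrop : cw.drop s = cw[s] :: cw.drop (s + 1) := List.drop_eq_getElem_cons hs
    have h1 : pvDOf cw (s : Int) = cw[s].2 := by
      simp [pvDOf, List.getElem?_eq_getElem hs]
    have h2 : ((s : Int) + 1) = ((s + 1 : Nat) : Int) := by push_cast; ring
    simp only [pvPairs, List.map_cons, hdrop, pvLev, List.zipWith_cons_cons, h1, h2,
      ih (s + 1) (by simp at hlen; omega)]

theorem pvPairs_length (l : List Int) (s : Int) : (pvPairs s l).length = l.length := by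
  induction l generalizing s with
  | nil => rfl
  | cons a t ih => simp [pvPairs, ih]

theorem pvPairs_snd_ge (l : List Int) (s : Int) : ∀ p ∈ pvPairs s l, s ≤ p.2 := by
  induction l generalizing s with
  | nil => simp [pvPairs]
  | cons a t ih =>
    intro p hp
    rcases List.mem_cons.mp hp with rfl | hp
    · simp
    · have := ih (s+1) p hp; omega

theorem pvPairs_nodup (l : List Int) (s : Int) : (pvPairs s l).Nodup := by
  induction l generalizing s with
  | nil => simp [pvPairs]
  | cons a t ih =>
    refine List.Pairwise.cons ?_ (ih (s+1))
    intro p hp heq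
    have := pvPairs_snd_ge t (s+1) p hp
    subst heq
    simp at this

theorem pvFoldInsort_perm {α : Type} (f : α → Int × Int) (l : List α) (acc : List (Int × Int)) :
    (l.foldl (fun L p => pvInsort (f p) L) acc).Perm (l.map f ++ acc) := by
  induction l generalizing acc with
  | nil => simp
  | cons h t ih =>
    simp only [List.foldl_cons, List.map_cons, List.cons_append]
    refine (ih (pvInsort (f h) acc)).trans ?_
    refine (List.Perm.append_left (t.map f) (pvInsort_perm (f h) acc)).trans ?_
    exact List.perm_middle

theorem pvFoldInsort_pairwise {α : Type} (f : α → Int × Int) (l : List α) (acc : List (Int × Int))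
    (hnd : (l.map f ++ acc).Nodup) (hacc : acc.Pairwise (fun a b => pvTupLt a b = true)) :
    (l.foldl (fun L p => pvInsort (f p) L) acc).Pairwise (fun a b => pvTupLt a b = true) := by
  induction l generalizing acc with
  | nil => exact hacc
  | cons h t ih =>
    simp only [List.foldl_cons]
    apply ih
    · have hp : (t.map f ++ pvInsort (f h) acc).Perm (f h :: (t.map f ++ acc)) :=
        (List.Perm.append_left (t.map f) (pvInsort_perm (f h) acc)).trans List.perm_middle
      exact hp.symm.nodup (by simpa using hnd)
    · apply pvInsort_pairwise hacc
      intro y hy heq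
      simp only [List.map_cons, List.cons_append, List.nodup_cons] at hnd
      exact hnd.1 (heq ▸ List.mem_append_right _ hy)

theorem pvPairs_enum (cw : List (Int × Int)) (s : Int) :
    (PySem.List.enumerate cw s).map (fun p => (p.2.1 + p.2.2, p.1)) =
      pvPairs s (cw.map (fun w => w.1 + w.2)) := by
  induction cw generalizing s with
  | nil => simp [pvPairs, PySem.List.enumerate]
  | cons w t ih => simp [PySem.List.enumerate_cons, pvPairs, ih]

theorem pvLev_init (cw : List (Int × Int)) :
    cw.map (fun w => w.1) = pvLev (cw.map (fun w => w.1 + w.2)) cw := by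
  induction cw with
  | nil => rfl
  | cons w t ih => simp [pvLev, List.zipWith_cons_cons] at *; simpa using ih
theorem pvInit (cw : List (Int × Int)) :
    pvRel cw (cw.map (fun w => w.1 + w.2), cw.map (fun w => w.1))
      ((PySem.List.enumerate cw).foldl (fun L p => pvInsort (p.2.1 + p.2.2, p.1) L) []) := by
  refine ⟨by simp, pvLev_init cw, ?_, ?_⟩
  · have := pvFoldInsort_perm (fun p => (p.2.1 + p.2.2, p.1)) (PySem.List.enumerate cw) []
    simpa [pvPairs_enum] using this
  · apply pvFoldInsort_pairwise
    · rw [List.append_nil, pvPairs_enum]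
      exact pvPairs_nodup _ _
    · simp

theorem pvStep (cw : List (Int × Int)) (s : List Int × List Int) (L : List (Int × Int))
    (hcw : cw ≠ []) (h : pvRel cw s L) : pvRel cw (pvAStep cw s) (pvAltStep cw L) := by
  obtain ⟨hlen, hlev, hperm, hpw⟩ := h
  have hannne : s.1 ≠ [] := by
    intro h0
    rw [h0] at hlen
    cases cw
    · exact hcw rfl
    · simp at hlen
  cases hL : L with
  | nil =>
    exfalso
    rw [hL] at hperm
    have := hperm.length_eq
    rw [pvPairs_length] at this
    exact hannne (List.eq_nil_of_length_eq_zero this.symm)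
  | cons hd rest =>
    obtain ⟨v, i⟩ := hd
    rw [hL] at hperm hpw
    have hmem : (v, i) ∈ pvPairs 0 s.1 := hperm.mem_iff.mp List.mem_cons_self
    obtain ⟨k, hk, hi, hv⟩ := (mem_pvPairs s.1 0).mp hmem
    have hi' : i = (k : Int) := by omega
    subst hi'
    have hbound : ∀ y ∈ pvPairs 0 s.1, y = (v, (k : Int)) ∨ pvTupLt (v, (k : Int)) y = true := by
      intro y hy
      rcases List.mem_cons.mp (hperm.mem_iff.mpr hy) with rfl | hr
      · exact Or.inl rfl
      · exact Or.inr ((List.pairwise_cons.mp hpw).1 y hr)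
    -- min(annoyance) = v
    have hminv : PySem.List.min? s.1 (fun x => x) = some v := by
      rcases hm : PySem.List.min? s.1 (fun x => x) with _ | m
      · exact absurd ((PySem.List.min?_eq_none_iff _ _).mp hm) hannne
      · have hm1 : m ≤ v := PySem.List.min?_isMin hm v (hv ▸ List.getElem_mem hk)
        have hm2 : v ≤ m := by
          obtain ⟨k', hk', hvk'⟩ := List.mem_iff_getElem.mp (PySem.List.min?_mem hm)
          have : (m, (k' : Int)) ∈ pvPairs 0 s.1 :=
            (mem_pvPairs s.1 0).mpr ⟨k', hk', by omega, hvk'⟩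
          rcases hbound _ this with heq | hlt
          · exact le_of_eq (congrArg Prod.fst heq).symm
          · simp only [pvTupLt, Bool.or_eq_true, Bool.and_eq_true, decide_eq_true_eq,
              beq_iff_eq] at hlt
            omega
        rw [le_antisymm hm1 hm2]
    -- annoyance.index(v) = k
    have hidx : PySem.List.index? s.1 v = some k := by
      rw [PySem.List.index?_eq_some_iff]
      refine ⟨s.1.take k, s.1.drop (k + 1), ?_, List.length_take_of_le hk.le, ?_⟩
      · conv_lhs => rw [← List.take_append_drop k s.1, List.drop_eq_getElem_cons hk, hv]
      · intro hvt
        obtain ⟨j, hj, hjv⟩ := List.mem_iff_getElem.mp hvt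
        have hjk : j < k := (by simpa using hj : j < k ∧ j < s.1.length).1
        rw [List.getElem_take] at hjv
        have hjmem : (v, (j : Int)) ∈ pvPairs 0 s.1 :=
          (mem_pvPairs s.1 0).mpr ⟨j, by omega, by omega, hjv⟩
        rcases hbound _ hjmem with heq | hlt
        · have := congrArg Prod.snd heq
          simp at this
          omega
        · simp only [pvTupLt, Bool.or_eq_true, Bool.and_eq_true, decide_eq_true_eq,
            beq_iff_eq] at hlt
          omega
    -- both steps take the same increment
    have hgetD : s.1.getD k 0 = v := by rw [List.getD_eq_getElem s.1 0 hk, hv]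
    have hrest : rest.Perm ((pvPairs 0 s.1).erase (v, (k : Int))) :=
      (List.Perm.cons_inv (hperm.trans (List.perm_cons_erase hmem)))
    have hrestpw : rest.Pairwise (fun a b => pvTupLt a b = true) := (List.pairwise_cons.mp hpw).2
    simp only [pvAltStep, pvAStep, hminv, hidx, Option.getD_some]
    refine ⟨by simp [hlen], ?_, ?_, ?_⟩
    · rw [hlev, pvLev_set s.1 cw k _ hk hlen, hgetD]
    · rw [hgetD]
      have hset := pvPairs_set s.1 k 0 (v + pvDOf cw (k : Int)) hk
      rw [hv] at hset
      refine ((pvInsort_perm _ _).trans (List.Perm.cons _ hrest)).trans ?_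
      simpa [pvDOf] using hset.symm
    · apply pvInsort_pairwise hrestpw
      intro y hy heq
      -- y = (v + d, i) in rest: contradiction
      have hlt : pvTupLt (v, (k : Int)) y = true := (List.pairwise_cons.mp hpw).1 y hy
      rw [← heq] at hlt
      simp only [pvTupLt, Bool.or_eq_true, Bool.and_eq_true, decide_eq_true_eq, beq_iff_eq] at hlt
      have hd : 0 < pvDOf cw (k : Int) := by omega
      have hymem : (v + pvDOf cw (k : Int), (k : Int)) ∈ pvPairs 0 s.1 :=
        hperm.mem_iff.mp (List.mem_cons_of_mem _ (heq ▸ hy))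
      obtain ⟨k2, hk2, hik2, hvk2⟩ := (mem_pvPairs s.1 0).mp hymem
      have : k2 = k := by omega
      subst this
      rw [hv] at hvk2
      omega

theorem pvFold (cw : List (Int × Int)) (r : List Int) (s : List Int × List Int) (L : List (Int × Int))
    (hcw : cw ≠ []) (h : pvRel cw s L) :
    pvRel cw (r.foldl (fun s _ => pvAStep cw s) s) (r.foldl (fun L _ => pvAltStep cw L) L) := by
  induction r generalizing s L with
  | nil => exact h
  | cons a t ih => exact ih _ _ (pvStep cw s L hcw h)

-- ===== VERDICT (by name: the statement is the Claim_ definition above) =====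
theorem annoyance_level_spec : Claim_equal_annoyance_level := by
  intro cw t n _ hpre
  simp only [Spec_annoyance_level, annoyance_level, annoyance_level_alt]
  obtain ⟨hlen, hlev, hperm, hpw⟩ :=
    pvFold cw (PySem.List.pyRange 0 t 1)
      (cw.map (fun w => w.1 + w.2), cw.map (fun w => w.1))
      ((PySem.List.enumerate cw).foldl (fun L p => pvInsort (p.2.1 + p.2.2, p.1) L) [])
      hpre (pvInit cw)
  refine pvMaxPerm _ _ ?_
  rw [hlev]
  have hmap := pvPairsMap
    ((PySem.List.pyRange 0 t 1).foldl (fun s _ => pvAStep cw s)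
      (cw.map (fun w => w.1 + w.2), cw.map (fun w => w.1))).1 cw 0 (by omega)
  simp only [Nat.cast_zero, List.drop_zero] at hmap
  exact ((hperm.map _).trans (by rw [hmap])).symm
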